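-- pv_equiv track=rewrite | github.com/tskow99/RANKVIDEO-Reasoning-Reranker | rankvideo/train_reranker.py | _find_any_last
-- ===== SOURCE A (Python) =====
-- def _find_any_last(hay_ids, patterns):
--     best = (-1, 0)
--     for pat in patterns:
--         if not pat:
--             continue
--         Lh, Lp = len(hay_ids), len(pat)
--         j = -1
--         for i in range(max(0, Lh - Lp), -1, -1):
--             if hay_ids[i:i+Lp] == pat:
--                 j = i
--                 break
--         if j != -1 and j > best[0]:
--             best = (j, len(pat))
--     return best
-- ===== SOURCE B (Python) =====
-- def _find_any_last(hay_ids, patterns):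
--     # Scan haystack start positions from the right; the first position where any
--     # (non-empty) pattern matches is the answer, taking the first such pattern.
--     for i in range(len(hay_ids) - 1, -1, -1):
--         for pat in patterns:
--             if pat and hay_ids[i:i+len(pat)] == pat:
--                 return (i, len(pat))
--     return (-1, 0)
-- ===== Notes on version B (the rewrite author's own statement) =====
-- stated objective: alternative
-- what changed: A loops over patterns, scanning candidate start positions backwards per pattern and folding a best (index, len) accumulator; B loops once over haystack positions right-to-left and returns at the first position where any (first) pattern matches, with no accumulator.
import Mathlib
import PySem

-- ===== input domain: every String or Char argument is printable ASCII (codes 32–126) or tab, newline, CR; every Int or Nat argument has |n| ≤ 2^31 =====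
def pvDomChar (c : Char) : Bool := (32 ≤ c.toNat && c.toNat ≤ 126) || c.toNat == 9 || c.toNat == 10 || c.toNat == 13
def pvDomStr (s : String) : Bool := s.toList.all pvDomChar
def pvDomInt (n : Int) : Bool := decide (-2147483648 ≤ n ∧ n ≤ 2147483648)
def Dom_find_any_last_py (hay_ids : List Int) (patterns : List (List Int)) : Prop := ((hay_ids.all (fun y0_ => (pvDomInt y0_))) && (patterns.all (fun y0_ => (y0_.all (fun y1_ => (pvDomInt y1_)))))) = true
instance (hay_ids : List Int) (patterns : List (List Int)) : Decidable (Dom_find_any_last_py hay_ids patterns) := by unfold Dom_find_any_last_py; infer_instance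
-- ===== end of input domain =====

-- B replaces A's per-pattern backwards scans with one right-to-left scan over haystack
-- positions that returns at the first position where any pattern matches (objective: alternative).

-- ===== PORT A =====
def find_any_last_py (hay_ids : List Int) (patterns : List (List Int)) : List Int :=
  let best := patterns.foldl (fun (best : Int × Int) pat =>
    if pat = [] then best
    else
      let Lh : Int := hay_ids.length
      let Lp : Int := pat.length
      let j : Int :=
        ((PySem.List.pyRange (max 0 (Lh - Lp)) (-1) (-1)).find?
            (fun i => PySem.List.slice hay_ids (some i) (some (i + Lp)) == pat)).getD (-1)
      if j ≠ -1 ∧ j > best.1 then (j, Lp) else best) ((-1 : Int), (0 : Int))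
  [best.1, best.2]

-- ===== PORT B =====
def find_any_last_py_alt (hay_ids : List Int) (patterns : List (List Int)) : List Int :=
  match (PySem.List.pyRange ((hay_ids.length : Int) - 1) (-1) (-1)).findSome?
      (fun i => (patterns.find? (fun pat =>
          !pat.isEmpty &&
            (PySem.List.slice hay_ids (some i) (some (i + (pat.length : Int))) == pat))).map
        (fun pat => ((i, (pat.length : Int)) : Int × Int))) with
  | some r => [r.1, r.2]
  | none => [-1, 0]

-- ===== PRECONDITION & SPEC =====
def Spec_find_any_last_py (hay_ids : List Int) (patterns : List (List Int)) (out : List Int) : Prop := out = find_any_last_py_alt hay_ids patterns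
instance (hay_ids : List Int) (patterns : List (List Int)) (out : List Int) : Decidable (Spec_find_any_last_py hay_ids patterns out) := by unfold Spec_find_any_last_py; infer_instance

-- ===== CLAIM (what is proved, stated in full; the proofs are below) =====
def Claim_equal_find_any_last_py : Prop := ∀ (hay_ids : List Int) (patterns : List (List Int)), Dom_find_any_last_py hay_ids patterns → Spec_find_any_last_py hay_ids patterns (find_any_last_py hay_ids patterns)

-- ===== LEMMAS AND PROOFS =====

-- match predicate: non-empty pat matches hay at position i
def pvQ (hay : List Int) (i : Int) (pat : List Int) : Bool :=
  !pat.isEmpty && (PySem.List.slice hay (some i) (some (i + (pat.length : Int))) == pat)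

-- [n-1, n-2, ..., 0]
def pvDesc : Nat → List Int
  | 0 => []
  | n+1 => (n : Int) :: pvDesc n

-- A's per-pattern step, with the scanned position list abstracted out
def pvStep (hay : List Int) (ds : List Int) (best : Int × Int) (pat : List Int) : Int × Int :=
  let j : Int := ((ds.find? (fun i => pvQ hay i pat)).getD (-1))
  if j ≠ -1 ∧ j > best.1 then (j, (pat.length : Int)) else best

-- B's per-position probe
def pvProbe (hay : List Int) (patterns : List (List Int)) (i : Int) : Option (Int × Int) :=
  (patterns.find? (fun pat => pvQ hay i pat)).map (fun pat => (i, (pat.length : Int)))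

theorem pvDesc_mem {n : Nat} {x : Int} (hx : x ∈ pvDesc n) : 0 ≤ x ∧ x < n := by
  induction n with
  | zero => simp [pvDesc] at hx
  | succ n ih =>
    simp only [pvDesc, List.mem_cons] at hx
    rcases hx with h | h
    · subst h; exact ⟨Int.natCast_nonneg n, by exact_mod_cast Nat.lt_succ_self n⟩
    · have := ih h; omega

theorem pyRange_eq_pvDesc (n : Nat) :
    PySem.List.pyRange ((n : Int) - 1) (-1) (-1) = pvDesc n := by
  induction n with
  | zero =>
    have h0 : ((0 : Nat) : Int) - 1 = -1 := by norm_num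
    rw [h0, PySem.List.pyRange_neg_one_eq_nil le_rfl]; rfl
  | succ n ih =>
    have h1 : ((n + 1 : Nat) : Int) - 1 = (n : Int) := by push_cast; ring
    rw [h1, PySem.List.pyRange_neg_one_cons (by omega)]
    simp only [pvDesc]
    rw [ih]

-- dropping the high (all-failing) positions does not change find?
theorem find?_pvDesc_of_high_fail (p : Int → Bool) (b : Nat) :
    ∀ (a : Nat), b ≤ a → (∀ i : Int, (b : Int) ≤ i → p i = false) →
    (pvDesc a).find? p = (pvDesc b).find? p := by
  intro a
  induction a with
  | zero => intro h _; have : b = 0 := Nat.le_zero.mp h; simp [this]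
  | succ a ih =>
    intro h hfail
    rcases Nat.lt_or_ge b (a+1) with hlt | hge
    · have hba : b ≤ a := Nat.lt_succ_iff.mp hlt
      have hpa : p (a : Int) = false := hfail _ (by exact_mod_cast hba)
      simp only [pvDesc, List.find?_cons, hpa]
      exact ih hba hfail
    · have : b = a + 1 := le_antisymm h hge
      simp [this]

-- per-pattern: A's backwards range scan = scan over the full descending position list
theorem perPattern (hay pat : List Int) (hp : pat ≠ []) :
    ((PySem.List.pyRange (max 0 ((hay.length : Int) - (pat.length : Int))) (-1) (-1)).find?
        (fun i => PySem.List.slice hay (some i) (some (i + (pat.length : Int))) == pat)).getD (-1)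
      = ((pvDesc hay.length).find? (fun i => pvQ hay i pat)).getD (-1) := by
  have hq : (fun i => PySem.List.slice hay (some i) (some (i + (pat.length : Int))) == pat)
      = (fun i => pvQ hay i pat) := by
    funext i; simp [pvQ, hp]
  set M : Nat := hay.length - pat.length with hM
  have hmax : max 0 ((hay.length : Int) - (pat.length : Int)) = ((M : Int) + 1) - 1 := by
    have hp1 : 1 ≤ pat.length := List.length_pos_iff.mpr hp
    omega
  rw [hq, hmax]
  have hrange := pyRange_eq_pvDesc (M + 1)
  rw [(by push_cast; ring : ((M + 1 : Nat) : Int) = (M : Int) + 1)] at hrange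
  rw [hrange]
  have hfail : ∀ i : Int, ((M + 1 : Nat) : Int) ≤ i → pvQ hay i pat = false := by
    intro i hi
    have hi0 : (0 : Int) ≤ i := by omega
    have hiM : (M : Int) < i := by push_cast at hi; omega
    rw [pvQ, Bool.and_eq_false_iff]
    right
    rw [beq_eq_false_iff_ne]
    intro hcon
    have hlen := congrArg List.length hcon
    rw [PySem.List.slice_toNat hay hi0 (by omega)] at hlen
    simp only [List.length_take, List.length_drop] at hlen
    have hp1 : 1 ≤ pat.length := List.length_pos_iff.mpr hp
    omega
  rcases Nat.lt_or_ge hay.length (M + 1) with hgt | hle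
  case inr => rw [find?_pvDesc_of_high_fail _ _ _ hle hfail]
  case inl =>
    -- hay.length < M + 1 forces hay = [] (M = hay.length - pat.length, pat nonempty)
    have hp1 : 1 ≤ pat.length := List.length_pos_iff.mpr hp
    have hhay : hay.length = 0 := by omega
    have hM0 : M = 0 := by omega
    rw [hhay, hM0]
    have h0 : pvQ hay 0 pat = false := by
      rw [pvQ, Bool.and_eq_false_iff]; right
      rw [beq_eq_false_iff_ne]
      intro hcon
      have hlen := congrArg List.length hcon
      rw [PySem.List.slice_toNat hay (by norm_num) (by omega)] at hlen
      simp only [List.length_take, List.length_drop] at hlen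
      omega
    simp [pvDesc, List.find?, h0]

-- folding over an empty position list keeps the accumulator
theorem foldl_pvStep_nil (hay : List Int) (pats : List (List Int)) :
    ∀ best, pats.foldl (pvStep hay []) best = best := by
  induction pats with
  | nil => intro best; rfl
  | cons p rest ih =>
    intro best
    simp only [List.foldl_cons, pvStep, List.find?_nil, Option.getD_none]
    simpa using ih best

-- if no pattern matches at position d, d can be dropped from the scanned list
theorem foldl_pvStep_cons_nomatch (hay : List Int) (pats : List (List Int)) (d : Int)
    (ds : List Int) (hnm : ∀ pat ∈ pats, pvQ hay d pat = false) (best : Int × Int) :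
    pats.foldl (pvStep hay (d :: ds)) best = pats.foldl (pvStep hay ds) best := by
  induction pats generalizing best with
  | nil => rfl
  | cons p rest ih =>
    simp only [List.foldl_cons]
    have hpd : pvQ hay d p = false := hnm p (List.mem_cons_self)
    have : pvStep hay (d :: ds) best p = pvStep hay ds best p := by
      simp only [pvStep, List.find?_cons, hpd]
    rw [this]
    exact ih (fun pat h => hnm pat (List.mem_cons_of_mem _ h)) _

-- once best.1 is the maximum of the scanned positions, the fold keeps best
theorem foldl_pvStep_keep (hay : List Int) (pats : List (List Int)) (ds : List Int)
    (D : Int) (L : Int) (hds : ∀ x ∈ ds, x ≤ D) :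
    pats.foldl (pvStep hay ds) (D, L) = (D, L) := by
  induction pats with
  | nil => rfl
  | cons p rest ih =>
    simp only [List.foldl_cons]
    have hstep : pvStep hay ds (D, L) p = (D, L) := by
      simp only [pvStep]
      cases hf : ds.find? (fun i => pvQ hay i p) with
      | none => simp
      | some x =>
        have hx : x ∈ ds := List.mem_of_find?_eq_some hf
        have : ¬ ((x : Int) ≠ -1 ∧ x > D) := by
          have := hds x hx; omega
        simp [this]
    rw [hstep]; exact ih

-- if some pattern matches at the head position d (largest), the fold returns (d, first match's len)
theorem foldl_pvStep_cons_match (hay : List Int) (d : Int) (ds : List Int)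
    (hd0 : 0 ≤ d) (hds : ∀ x ∈ ds, x < d) :
    ∀ (pats : List (List Int)) (p0 : List Int) (best : Int × Int),
    best.1 < d → pats.find? (fun pat => pvQ hay d pat) = some p0 →
    pats.foldl (pvStep hay (d :: ds)) best = (d, (p0.length : Int)) := by
  intro pats
  induction pats with
  | nil => intro p0 best _ hf; simp at hf
  | cons p rest ih =>
    intro p0 best hbest hf
    simp only [List.foldl_cons]
    cases hqd : pvQ hay d p with
    | true =>
      rw [List.find?_cons, hqd] at hf
      simp only [Option.some.injEq] at hf; subst hf
      have hstep : pvStep hay (d :: ds) best p = (d, (p.length : Int)) := by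
        simp only [pvStep, List.find?_cons, hqd, Option.getD_some]
        have : (d ≠ -1 ∧ d > best.1) := ⟨by omega, hbest⟩
        simp [this]
      rw [hstep]
      exact foldl_pvStep_keep hay rest (d :: ds) d _ (by
        intro x hx
        rcases List.mem_cons.mp hx with h | h
        · omega
        · exact le_of_lt (hds x h))
    | false =>
      rw [List.find?_cons, hqd] at hf
      have hstep : (pvStep hay (d :: ds) best p).1 < d := by
        simp only [pvStep, List.find?_cons, hqd]
        cases hfd : ds.find? (fun i => pvQ hay i p) with
        | none => simpa using hbest
        | some x =>
          have hx : x < d := hds x (List.mem_of_find?_eq_some hfd)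
          simp only [Option.getD_some]
          split
          · exact hx
          · exact hbest
      exact ih p0 _ hstep hf

-- a match on an Option (Int × Int) producing a two-element list, as a getD
theorem pvMatch_eq (o : Option (Int × Int)) :
    (match o with
      | some r => [r.1, r.2]
      | none => [(-1 : Int), (0 : Int)])
      = [(o.getD ((-1 : Int), (0 : Int))).1, (o.getD ((-1 : Int), (0 : Int))).2] := by
  cases o <;> rfl

-- main bridge: A's fold over patterns = B's right-to-left position search
theorem main_bridge (hay : List Int) (pats : List (List Int)) :
    ∀ n : Nat,
      pats.foldl (pvStep hay (pvDesc n)) ((-1 : Int), (0 : Int))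
        = ((pvDesc n).findSome? (pvProbe hay pats)).getD ((-1 : Int), (0 : Int)) := by
  intro n
  induction n with
  | zero => simp [pvDesc, foldl_pvStep_nil]
  | succ n ih =>
    simp only [pvDesc, List.findSome?_cons]
    cases hf : pats.find? (fun pat => pvQ hay (n : Int) pat) with
    | none =>
      have hnm : ∀ pat ∈ pats, pvQ hay (n : Int) pat = false := by
        intro pat hpat
        have := List.find?_eq_none.mp hf pat hpat
        simpa using this
      rw [foldl_pvStep_cons_nomatch hay pats _ _ hnm]
      simp only [pvProbe, hf, Option.map_none]
      exact ih
    | some p0 =>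
      rw [foldl_pvStep_cons_match hay (n : Int) (pvDesc n) (by positivity)
        (fun x hx => (pvDesc_mem hx).2) pats p0 _ (by simp; omega) hf]
      simp [pvProbe, hf]

-- ===== VERDICT (by name: the statement is the Claim_ definition above) =====
theorem find_any_last_py_spec : Claim_equal_find_any_last_py := by
  intro hay pats _
  unfold Spec_find_any_last_py find_any_last_py find_any_last_py_alt
  have hstepeq : pats.foldl (fun (best : Int × Int) pat =>
      if pat = [] then best
      else
        let Lh : Int := hay.length
        let Lp : Int := pat.length
        let j : Int :=
          ((PySem.List.pyRange (max 0 (Lh - Lp)) (-1) (-1)).find?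
              (fun i => PySem.List.slice hay (some i) (some (i + Lp)) == pat)).getD (-1)
        if j ≠ -1 ∧ j > best.1 then (j, Lp) else best) ((-1 : Int), (0 : Int))
      = pats.foldl (pvStep hay (pvDesc hay.length)) ((-1 : Int), (0 : Int)) := by
    apply PySem.List.foldl_congr_mem
    intro best pat _
    by_cases hp : pat = []
    · subst hp
      have hfind : (pvDesc hay.length).find? (fun i => pvQ hay i ([] : List Int)) = none := by
        apply List.find?_eq_none.mpr
        intro x _
        simp [pvQ]
      simp [pvStep, hfind]
    · simp only [if_neg hp, pvStep]
      rw [perPattern hay pat hp]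
  rw [hstepeq, main_bridge hay pats hay.length, ← pyRange_eq_pvDesc hay.length,
    pvMatch_eq]
  rfl
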